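-- pv_equiv track=rewrite | github.com/samvv/Templaty | templaty/util.py | starts_with_newline
-- ===== SOURCE A (Python) =====
-- def starts_with_newline(text):
--     for ch in text:
--         if ch == '\n':
--             return True
--         if ch == ' ' or ch == '\t' or ch == '\r':
--             continue
--         break
--     return False
-- ===== SOURCE B (Python) =====
-- def starts_with_newline(text):
--     i = text.find('\n')
--     return i != -1 and set(text[:i]) <= {' ', '\t', '\r'}
-- ===== Notes on version B (the rewrite author's own statement) =====
-- stated objective: alternative
-- what changed: Instead of scanning characters with early exit, B first locates the first newline with str.find and then checks that every character before it lies in the skippable set {' ','\t','\r'} via a set-inclusion test.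
import Mathlib
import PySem

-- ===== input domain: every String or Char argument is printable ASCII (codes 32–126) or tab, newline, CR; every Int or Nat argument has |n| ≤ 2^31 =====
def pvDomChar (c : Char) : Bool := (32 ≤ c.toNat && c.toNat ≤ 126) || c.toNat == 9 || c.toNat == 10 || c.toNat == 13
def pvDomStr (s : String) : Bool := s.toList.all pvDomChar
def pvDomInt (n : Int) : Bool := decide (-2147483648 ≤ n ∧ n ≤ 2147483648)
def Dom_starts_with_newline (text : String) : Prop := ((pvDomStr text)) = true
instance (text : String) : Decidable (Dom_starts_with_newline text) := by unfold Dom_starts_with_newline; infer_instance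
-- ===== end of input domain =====

-- B replaces A's skip-and-early-exit character scan by locating the first newline with find
-- and then testing that everything before it is in the skippable set (alternative algorithm, same cost).

-- ===== PORT A =====
-- A's loop: stop with True at '\n', skip ' '/'\t'/'\r', else stop with False
def swnLoop : List Char → Bool
  | [] => false
  | c :: rest =>
    if c == '\n' then true
    else if c == ' ' || c == '\t' || c == '\r' then swnLoop rest
    else false

def starts_with_newline (text : String) : Bool := swnLoop text.toList

-- ===== PORT B =====
-- i = text.find('\n'); return i != -1 and set(text[:i]) <= {' ', '\t', '\r'}
-- (text[:i] ported as PySem.List.slice on the character list — exact for a string slice)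
def starts_with_newline_alt (text : String) : Bool :=
  let i := PySem.Str.find text "\n"
  i != -1 &&
    PySem.Set.issubset (PySem.Set.ofList (PySem.List.slice text.toList none (some i)))
      (PySem.Set.ofList [' ', '\t', '\r'])

-- ===== PRECONDITION & SPEC =====
def Spec_starts_with_newline (text : String) (out : Bool) : Prop := out = starts_with_newline_alt text
instance (text : String) (out : Bool) : Decidable (Spec_starts_with_newline text out) := by unfold Spec_starts_with_newline; infer_instance

-- ===== CLAIM =====
def Claim_equal_starts_with_newline : Prop := ∀ (text : String), Dom_starts_with_newline text → Spec_starts_with_newline text (starts_with_newline text)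

-- ===== LEMMAS AND PROOFS =====

-- defeq unfoldings of find.go for the single-character pattern '\n'
theorem swn_go_nil (k : Nat) : PySem.Chars.find.go ['\n'] [] k = -1 := rfl

theorem swn_go_cons (c : Char) (t : List Char) (k : Nat) :
    PySem.Chars.find.go ['\n'] (c :: t) k =
      if ('\n' == c) then (k : Int) else PySem.Chars.find.go ['\n'] t (k + 1) := by
  show (if List.isPrefixOf ['\n'] (c :: t) then (k : Int) else PySem.Chars.find.go ['\n'] t (k + 1)) = _
  simp [List.isPrefixOf]

-- find.go with pattern ['\n'] at offset k, expressed through find (offset 0)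
theorem swn_go_shift (t : List Char) (k : Nat) :
    PySem.Chars.find.go ['\n'] t k =
      if PySem.Chars.find t ['\n'] = -1 then -1 else PySem.Chars.find t ['\n'] + k := by
  induction t generalizing k with
  | nil => simp [PySem.Chars.find, swn_go_nil]
  | cons c rest ih =>
    have hfind : PySem.Chars.find (c :: rest) ['\n'] =
        if ('\n' == c) then (0 : Int) else PySem.Chars.find.go ['\n'] rest 1 := by
      simpa [PySem.Chars.find] using swn_go_cons c rest 0
    have hlb := PySem.Chars.neg_one_le_find rest ['\n']
    rw [swn_go_cons, hfind, ih, ih 1]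
    by_cases h : ('\n' == c) = true
    · simp [h]
    · simp only [Bool.not_eq_true] at h
      simp only [h, Bool.false_eq_true, if_false]
      split_ifs with h1 h2 h2 <;> omega

-- cons step of find for the single-character pattern '\n'
theorem swn_find_cons (c : Char) (t : List Char) :
    PySem.Chars.find (c :: t) ['\n'] =
      if c = '\n' then 0
      else if PySem.Chars.find t ['\n'] = -1 then -1 else PySem.Chars.find t ['\n'] + 1 := by
  have h0 : PySem.Chars.find (c :: t) ['\n'] =
      if ('\n' == c) then (0 : Int) else PySem.Chars.find.go ['\n'] t 1 := by
    simpa [PySem.Chars.find] using swn_go_cons c t 0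
  rw [h0, swn_go_shift]
  by_cases h : c = '\n'
  · simp [h]
  · have : ('\n' == c) = false := by simp; exact fun e => h e.symm
    simp [this, h]

-- set(xs) <= t tests exactly the elements of xs
theorem swn_issubset_ofList {α : Type} [BEq α] [LawfulBEq α] (xs t : List α) :
    PySem.Set.issubset (PySem.Set.ofList xs) t = xs.all (fun x => t.contains x) := by
  rw [Bool.eq_iff_iff]
  simp only [PySem.Set.issubset, ← PySem.List.dedup_eq_ofList, List.all_eq_true]
  constructor
  · intro h x hx
    exact h x ((PySem.List.mem_dedup xs x).mpr hx)
  · intro h x hx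
    exact h x ((PySem.List.mem_dedup xs x).mp hx)

-- the core equivalence on character lists
theorem swn_key (l : List Char) :
    swnLoop l =
      ((PySem.Chars.find l ['\n'] != -1) &&
        (l.take (PySem.Chars.find l ['\n']).toNat).all
          (fun c => List.contains [' ', '\t', '\r'] c)) := by
  induction l with
  | nil => decide
  | cons c rest ih =>
    rw [swn_find_cons]
    by_cases h10 : c = '\n'
    · subst h10; simp [swnLoop]
    · have hb10 : (c == '\n') = false := by simp [h10]
      have hlb := PySem.Chars.neg_one_le_find rest ['\n']
      rw [if_neg h10]
      by_cases hm1 : PySem.Chars.find rest ['\n'] = -1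
      · rw [if_pos hm1]
        simp only [swnLoop, hb10, Bool.false_eq_true, if_false, ih, hm1]
        split_ifs <;> simp
      · have hge : 0 ≤ PySem.Chars.find rest ['\n'] := by omega
        have htn : (PySem.Chars.find rest ['\n'] + 1).toNat
            = (PySem.Chars.find rest ['\n']).toNat + 1 := by omega
        have hne1 : (PySem.Chars.find rest ['\n'] + 1 != -1) = true := by simp; omega
        have hne0 : (PySem.Chars.find rest ['\n'] != -1) = true := by simp [hm1]
        rw [if_neg hm1, htn, List.take_succ_cons, List.all_cons, hne1, Bool.true_and]
        by_cases hskip : c = ' ' ∨ c = '\t' ∨ c = '\r'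
        · have hmem : List.contains [' ', '\t', '\r'] c = true := by
            rcases hskip with h | h | h <;> subst h <;> decide
          have hskipB : (c == ' ' || c == '\t' || c == '\r') = true := by
            rcases hskip with h | h | h <;> subst h <;> decide
          simp only [swnLoop, hb10, Bool.false_eq_true, if_false, hskipB, if_true, ih,
            hne0, Bool.true_and, hmem]
        · have hmem : List.contains [' ', '\t', '\r'] c = false := by
            simp only [not_or] at hskip
            obtain ⟨h1, h2, h3⟩ := hskip
            simp [h1, h2, h3]
          have hskipB : (c == ' ' || c == '\t' || c == '\r') = false := by
            simp only [not_or] at hskip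
            obtain ⟨h1, h2, h3⟩ := hskip
            simp [h1, h2, h3]
          simp only [swnLoop, hb10, Bool.false_eq_true, if_false, hskipB, hmem,
            Bool.false_and]

-- ===== VERDICT =====
theorem starts_with_newline_spec : Claim_equal_starts_with_newline := by
  intro text _
  unfold Spec_starts_with_newline starts_with_newline starts_with_newline_alt
  have hofl : PySem.Set.ofList [' ', '\t', '\r'] = [' ', '\t', '\r'] := by decide
  simp only [PySem.Str.find_eq]
  have hnl : ("\n" : String).toList = ['\n'] := by decide
  rw [hnl, hofl]
  have hlb := PySem.Chars.neg_one_le_find text.toList ['\n']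
  rcases (by omega : 0 ≤ PySem.Chars.find text.toList ['\n'] ∨
      PySem.Chars.find text.toList ['\n'] = -1) with hge | hm1
  · rw [PySem.List.slice_to _ hge, swn_issubset_ofList, swn_key]
  · rw [swn_key, hm1]
    simp
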